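-- pv_equiv track=rewrite | github.com/pypi-data/pypi-mirror-351 | packages/ortho-polys/ortho_polys-0.1.1-py3-none-any.whl/ortho_poly/polynomials.py | recurrent
-- ===== SOURCE A (Python) =====
-- def recurrent(n, x_val):
--     """Рекуррентная формула"""
--     if n == 0:
--         return 1
--     elif n == 1:
--         return 2 * x_val
--     else:
--         U0, U1 = 1, 2 * x_val
--         for _ in range(2, n + 1):
--             U0, U1 = U1, 2 * x_val * U1 - U0
--         return U1
-- ===== SOURCE B (Python) =====
-- def recurrent(n, x_val):
--     """U_n as the top-left entry of [[2x,-1],[1,0]]**n, by squaring."""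
--     if n == 0:
--         return 1
--     if n <= 1:
--         # degrees below 2 never enter the recurrence; the value is 2*x_val
--         return 2 * x_val
--
--     def mul(p, q):
--         a, b, c, d = p
--         e, f, g, h = q
--         return (a * e + b * g, a * f + b * h, c * e + d * g, c * f + d * h)
--
--     r = (1, 0, 0, 1)
--     m = (2 * x_val, -1, 1, 0)
--     k = n
--     while k:
--         if k & 1:
--             r = mul(r, m)
--         m = mul(m, m)
--         k >>= 1
--     return r[0]
-- ===== Notes on version B (the rewrite author's own statement) =====
-- stated objective: alternative
-- what changed: Replaces the linear two-variable recurrence loop by exponentiation-by-squaring of the 2x2 companion matrix [[2x,-1],[1,0]], reading U_n off its top-left entry.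
import Mathlib
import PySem

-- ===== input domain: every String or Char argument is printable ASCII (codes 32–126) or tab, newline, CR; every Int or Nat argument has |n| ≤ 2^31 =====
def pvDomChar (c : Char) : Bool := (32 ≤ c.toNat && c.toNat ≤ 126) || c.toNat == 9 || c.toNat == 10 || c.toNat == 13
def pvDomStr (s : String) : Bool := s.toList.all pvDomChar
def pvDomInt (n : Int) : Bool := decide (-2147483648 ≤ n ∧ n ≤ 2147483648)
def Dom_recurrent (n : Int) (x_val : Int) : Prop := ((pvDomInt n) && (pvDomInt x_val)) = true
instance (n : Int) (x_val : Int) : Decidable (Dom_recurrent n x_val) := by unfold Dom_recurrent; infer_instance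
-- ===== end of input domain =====

-- B computes U_n by squaring the companion matrix [[2x,-1],[1,0]] instead of A's linear recurrence loop ; return values agree everywhere (for n < 0 both return 2*x_val, A via its empty loop, B via its base case).

-- ===== PORT A =====
def recurrent (n : Int) (x_val : Int) : Int :=
  if n == 0 then 1
  else if n == 1 then 2 * x_val
  else
    ((PySem.List.pyRange 2 (n + 1) 1).foldl
      (fun (st : Int × Int) _ => (st.2, 2 * x_val * st.2 - st.1)) (1, 2 * x_val)).2

-- ===== PORT B =====
-- 2x2 integer matrix (a, b, c, d) = [[a, b], [c, d]]; mul from Source B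
def mmul (p q : Int × Int × Int × Int) : Int × Int × Int × Int :=
  (p.1 * q.1 + p.2.1 * q.2.2.1, p.1 * q.2.1 + p.2.1 * q.2.2.2,
   p.2.2.1 * q.1 + p.2.2.2 * q.2.2.1, p.2.2.1 * q.2.1 + p.2.2.2 * q.2.2.2)

-- Source B's while-loop over the bits of k (k & 1 → k % 2 = 1, k >>= 1 → k / 2)
def bpow (r m : Int × Int × Int × Int) (k : Nat) : Int × Int × Int × Int :=
  if k = 0 then r
  else bpow (if k % 2 = 1 then mmul r m else r) (mmul m m) (k / 2)
termination_by k
decreasing_by omega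

def recurrent_alt (n : Int) (x_val : Int) : Int :=
  if n == 0 then 1
  else if n ≤ 1 then 2 * x_val
  else (bpow (1, 0, 0, 1) (2 * x_val, -1, 1, 0) n.toNat).1

-- ===== PRECONDITION & SPEC =====
def Spec_recurrent (n : Int) (x_val : Int) (out : Int) : Prop := out = recurrent_alt n x_val
instance (n : Int) (x_val : Int) (out : Int) : Decidable (Spec_recurrent n x_val out) := by unfold Spec_recurrent; infer_instance

-- ===== CLAIM (what is proved, stated in full; the proofs are below) =====
def Claim_equal_recurrent : Prop := ∀ (n : Int) (x_val : Int), Dom_recurrent n x_val → Spec_recurrent n x_val (recurrent n x_val)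

-- ===== LEMMAS AND PROOFS =====

-- the Chebyshev-U recurrence, and its two shifted companions
def chebU (x : Int) : Nat → Int
  | 0 => 1
  | 1 => 2 * x
  | (k + 2) => 2 * x * chebU x (k + 1) - chebU x k

def chebV (x : Int) : Nat → Int
  | 0 => 0
  | (k + 1) => chebU x k

def chebP (x : Int) : Nat → Int
  | 0 => -1
  | (k + 1) => chebV x k

lemma chebU_succ (x : Int) (k : Nat) :
    chebU x (k + 1) = 2 * x * chebU x k - chebV x k := by
  cases k with
  | zero => simp [chebU, chebV]
  | succ k => simp [chebU, chebV]

lemma chebV_key (x : Int) (k : Nat) :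
    2 * x * chebV x k - chebP x k = chebU x k := by
  cases k with
  | zero => simp [chebU, chebV, chebP]
  | succ k => simpa [chebV, chebP] using (chebU_succ x k).symm

-- successor-step power, for reasoning about bpow
def spow (m : Int × Int × Int × Int) : Nat → Int × Int × Int × Int
  | 0 => (1, 0, 0, 1)
  | (k + 1) => mmul m (spow m k)

lemma mmul_assoc (p q r : Int × Int × Int × Int) :
    mmul (mmul p q) r = mmul p (mmul q r) := by
  obtain ⟨a, b, c, d⟩ := p; obtain ⟨e, f, g, h⟩ := q; obtain ⟨i, j, k, l⟩ := r
  simp only [mmul, Prod.mk.injEq]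
  refine ⟨by ring, by ring, by ring, by ring⟩

lemma mmul_one_right (p : Int × Int × Int × Int) : mmul p (1, 0, 0, 1) = p := by
  obtain ⟨a, b, c, d⟩ := p; simp [mmul]

lemma mmul_one_left (p : Int × Int × Int × Int) : mmul (1, 0, 0, 1) p = p := by
  obtain ⟨a, b, c, d⟩ := p; simp [mmul]

lemma spow_two_mul (m : Int × Int × Int × Int) (j : Nat) :
    spow (mmul m m) j = spow m (2 * j) := by
  induction j with
  | zero => simp [spow]
  | succ j ih =>
    have h2 : 2 * (j + 1) = 2 * j + 1 + 1 := by omega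
    rw [h2]
    simp [spow, ih, mmul_assoc]

lemma bpow_eq_spow (k : Nat) : ∀ r m, bpow r m k = mmul r (spow m k) := by
  induction k using Nat.strong_induction_on with
  | _ k ih =>
    intro r m
    rw [bpow]
    by_cases hk : k = 0
    · simp [hk, spow, mmul_one_right]
    · simp only [hk, ite_false]
      rw [ih (k / 2) (by omega)]
      rw [spow_two_mul]
      by_cases hodd : k % 2 = 1
      · have hk2 : k = 2 * (k / 2) + 1 := by omega
        simp only [hodd, if_true]
        rw [mmul_assoc]
        congr 1
        conv_rhs => rw [hk2]
        simp [spow]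
      · have hk2 : k = 2 * (k / 2) := by omega
        simp only [hodd, ite_false]
        rw [← hk2]

lemma spow_entries (x : Int) (k : Nat) :
    spow (2 * x, -1, 1, 0) k = (chebU x k, -(chebV x k), chebV x k, -(chebP x k)) := by
  induction k with
  | zero => simp [spow, chebU, chebV, chebP]
  | succ k ih =>
    rw [spow, ih]
    have hv : chebV x (k + 1) = chebU x k := rfl
    have hp : chebP x (k + 1) = chebV x k := rfl
    simp only [mmul, Prod.mk.injEq, hv, hp]
    refine ⟨?_, ?_, by ring, by ring⟩
    · have := chebU_succ x k; linarith
    · have := chebV_key x k; linarith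

-- A's fold advances the recurrence one step per element, regardless of the element
lemma foldA (x : Int) (L : List Int) : ∀ k : Nat,
    L.foldl (fun (st : Int × Int) _ => (st.2, 2 * x * st.2 - st.1))
      (chebU x k, chebU x (k + 1))
    = (chebU x (k + L.length), chebU x (k + L.length + 1)) := by
  induction L with
  | nil => intro k; simp
  | cons a t ih =>
    intro k
    have hstep : (2 * x * chebU x (k + 1) - chebU x k) = chebU x (k + 2) := by
      simp [chebU]
    simp only [List.foldl_cons]
    rw [show ((chebU x (k + 1), 2 * x * chebU x (k + 1) - chebU x k) : Int × Int)
        = (chebU x (k + 1), chebU x (k + 1 + 1)) by rw [hstep]]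
    rw [ih (k + 1)]
    have h1 : k + 1 + t.length = k + (a :: t).length := by simp; omega
    rw [h1]

-- ===== VERDICT (by name: the statement is the Claim_ definition above) =====
theorem recurrent_spec : Claim_equal_recurrent := by
  intro n x _
  unfold Spec_recurrent recurrent recurrent_alt
  by_cases h0 : n = 0
  · simp [h0]
  · by_cases h1 : n = 1
    · simp [h1]
    · by_cases hneg : n ≤ 1
      -- n < 0 (n ≠ 0, n ≠ 1, n ≤ 1): A's range(2, n+1) is empty, both return 2*x
      · have hlt : n + 1 ≤ 2 := by omega
        have hr : PySem.List.pyRange 2 (n + 1) 1 = [] := by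
          rw [PySem.List.pyRange_one]
          have : (n + 1 - 2).toNat = 0 := by omega
          simp [this]
        simp [h0, h1, hneg, hr]
      -- n ≥ 2: both sides equal chebU x n.toNat
      · have hn2 : 2 ≤ n := by omega
        have hA :
            ((PySem.List.pyRange 2 (n + 1) 1).foldl
              (fun (st : Int × Int) _ => (st.2, 2 * x * st.2 - st.1)) (1, 2 * x)).2
            = chebU x n.toNat := by
          have hinit : ((1 : Int), 2 * x) = (chebU x 0, chebU x 1) := by
            simp [chebU]
          rw [hinit, foldA x _ 0]
          have hlen : (PySem.List.pyRange 2 (n + 1) 1).length = (n - 1).toNat := by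
            rw [PySem.List.length_pyRange_one]
            congr 1
            omega
          rw [hlen]
          show chebU x (0 + (n - 1).toNat + 1) = chebU x n.toNat
          congr 1
          omega
        have hB : (bpow (1, 0, 0, 1) (2 * x, -1, 1, 0) n.toNat).1 = chebU x n.toNat := by
          rw [bpow_eq_spow, mmul_one_left, spow_entries]
        simp only [h0, h1, hneg, beq_iff_eq, ite_false]
        rw [hA, hB]
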